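-- pv_equiv track=rewrite | github.com/hessuss14710/rolia | story-engine/services/karma_system.py | get_faction_context_for_ai
-- ===== SOURCE A (Python) =====
-- from typing import Optional, List, Dict, Any, Tuple
--
-- def get_faction_context_for_ai(
--
--     faction_standings: Dict[str, int]
-- ) -> Dict[str, str]:
--     """Generate faction standing descriptions for AI."""
--     contexts = {}
--
--     for faction, standing in faction_standings.items():
--         if standing >= 80:
--             status = "aliado"
--             desc = "confían plenamente"
--         elif standing >= 60:
--             status = "favorable"
--             desc = "son amigables"
--         elif standing >= 40:
--             status = "neutral"
--             desc = "son cautelosos"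
--         elif standing >= 20:
--             status = "desfavorable"
--             desc = "desconfían"
--         else:
--             status = "hostil"
--             desc = "son enemigos"
--
--         contexts[faction] = f"{status} ({desc})"
--
--     return contexts
-- ===== SOURCE B (Python) =====
-- # Arithmetic bucketing: the tier is the clamped value of standing // 20, so no
-- # comparisons at all — one floor-division indexes a precomputed description table.
-- _DESCRIPTIONS = [
--     "hostil (son enemigos)",
--     "desfavorable (desconfían)",
--     "neutral (son cautelosos)",
--     "favorable (son amigables)",
--     "aliado (confían plenamente)",
-- ]
--
-- def get_faction_context_for_ai(faction_standings):
--     return {faction: _DESCRIPTIONS[min(max(standing // 20, 0), 4)]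
--             for faction, standing in faction_standings.items()}
-- ===== Notes on version B (the rewrite author's own statement) =====
-- stated objective: alternative
-- what changed: Replaced the five-way comparison cascade with a closed-form arithmetic bucket index (clamped standing // 20) into a precomputed description table, built as a dict comprehension with no runtime string formatting.
import Mathlib
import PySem

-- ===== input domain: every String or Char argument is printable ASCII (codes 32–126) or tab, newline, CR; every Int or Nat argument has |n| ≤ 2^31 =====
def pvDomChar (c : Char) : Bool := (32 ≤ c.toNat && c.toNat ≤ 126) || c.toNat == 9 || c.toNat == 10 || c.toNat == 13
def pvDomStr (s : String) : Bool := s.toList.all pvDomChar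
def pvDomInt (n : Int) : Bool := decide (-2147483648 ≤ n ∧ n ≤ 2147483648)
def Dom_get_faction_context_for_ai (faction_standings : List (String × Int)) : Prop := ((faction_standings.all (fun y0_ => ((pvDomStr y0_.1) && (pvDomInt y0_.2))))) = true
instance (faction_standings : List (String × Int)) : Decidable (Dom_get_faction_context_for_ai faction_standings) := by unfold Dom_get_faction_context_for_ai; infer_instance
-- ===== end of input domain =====

-- B replaces A's comparison cascade by a clamped arithmetic bucket index (standing // 20)
-- into a precomputed description table (alternative decomposition; same return value).

-- ===== PORT A =====
-- the if/elif cascade of A, producing the f-string "status (desc)"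
def pvCascade (standing : Int) : String :=
  if standing ≥ 80 then "aliado" ++ " (" ++ "confían plenamente" ++ ")"
  else if standing ≥ 60 then "favorable" ++ " (" ++ "son amigables" ++ ")"
  else if standing ≥ 40 then "neutral" ++ " (" ++ "son cautelosos" ++ ")"
  else if standing ≥ 20 then "desfavorable" ++ " (" ++ "desconfían" ++ ")"
  else "hostil" ++ " (" ++ "son enemigos" ++ ")"

def get_faction_context_for_ai (faction_standings : List (String × Int)) : List (String × String) :=
  (faction_standings.foldl
    (fun (contexts : PySem.Dict String String) p =>
      contexts.insert p.1 (pvCascade p.2))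
    PySem.Dict.empty).items

-- ===== PORT B =====
def pvDescriptions : List String :=
  ["hostil (son enemigos)", "desfavorable (desconfían)", "neutral (son cautelosos)",
   "favorable (son amigables)", "aliado (confían plenamente)"]

-- min(max(standing // 20, 0), 4), Python floor division
def pvBucket (standing : Int) : Nat :=
  (min (max (PySem.Int.floordiv standing 20) 0) 4).toNat

-- dict comprehension: insertion order with overwrite, as the Dict fold
def get_faction_context_for_ai_alt (faction_standings : List (String × Int)) : List (String × String) :=
  (faction_standings.foldl
    (fun (contexts : PySem.Dict String String) p =>
      contexts.insert p.1 (pvDescriptions.getD (pvBucket p.2) ""))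
    PySem.Dict.empty).items

-- ===== PRECONDITION & SPEC =====
def Spec_get_faction_context_for_ai (faction_standings : List (String × Int)) (out : List (String × String)) : Prop := out = get_faction_context_for_ai_alt faction_standings
instance (faction_standings : List (String × Int)) (out : List (String × String)) : Decidable (Spec_get_faction_context_for_ai faction_standings out) := by unfold Spec_get_faction_context_for_ai; infer_instance

-- ===== CLAIM =====
def Claim_equal_get_faction_context_for_ai : Prop := ∀ (faction_standings : List (String × Int)), Dom_get_faction_context_for_ai faction_standings → Spec_get_faction_context_for_ai faction_standings (get_faction_context_for_ai faction_standings)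

-- ===== LEMMAS AND PROOFS =====
theorem pv_bucket_eq (s : Int) :
    pvBucket s = if s ≥ 80 then 4 else if s ≥ 60 then 3 else
                 if s ≥ 40 then 2 else if s ≥ 20 then 1 else 0 := by
  unfold pvBucket
  rw [PySem.Int.floordiv_eq_ediv_of_pos (by omega : (0:Int) < 20)]
  split_ifs <;> omega

theorem pv_label_eq (s : Int) :
    pvDescriptions.getD (pvBucket s) "" = pvCascade s := by
  rw [pv_bucket_eq]
  unfold pvDescriptions pvCascade
  by_cases h80 : s ≥ 80 <;> by_cases h60 : s ≥ 60 <;>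
    by_cases h40 : s ≥ 40 <;> by_cases h20 : s ≥ 20 <;>
    simp [h80, h60, h40, h20]

theorem pv_fold_eq (xs : List (String × Int)) (d : PySem.Dict String String) :
    xs.foldl (fun (contexts : PySem.Dict String String) p =>
        contexts.insert p.1 (pvCascade p.2)) d
      = xs.foldl (fun (contexts : PySem.Dict String String) p =>
        contexts.insert p.1 (pvDescriptions.getD (pvBucket p.2) "")) d := by
  induction xs generalizing d with
  | nil => rfl
  | cons p rest ih =>
      simp only [List.foldl_cons, pv_label_eq p.2]
      exact ih _

-- ===== VERDICT =====
theorem get_faction_context_for_ai_spec : Claim_equal_get_faction_context_for_ai := by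
  intro xs _
  unfold Spec_get_faction_context_for_ai get_faction_context_for_ai get_faction_context_for_ai_alt
  rw [pv_fold_eq]
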